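-- pv_equiv track=rewrite | github.com/roalyr/wireframe-cli-renderer | TRUTH_original-wireframe-cli-render.py | _rgb_to_nearest_xterm
-- ===== SOURCE A (Python) =====
-- _CUBE_VALUES = [0, 95, 135, 175, 215, 255]
--
-- def _rgb_to_nearest_xterm(r, g, b):
--     """Find the nearest xterm-256 index for an (r, g, b) color.
--     Searches the 6x6x6 cube and the grayscale ramp for best match."""
--
--     def _nearest_cube_val(v):
--         """Find nearest index in the 6-level cube axis."""
--         best_i = 0
--         best_d = abs(v - _CUBE_VALUES[0])
--         for i in range(1, 6):
--             d = abs(v - _CUBE_VALUES[i])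
--             if d < best_d:
--                 best_d = d
--                 best_i = i
--         return best_i
--
--     # Find best cube match
--     ri = _nearest_cube_val(r)
--     gi = _nearest_cube_val(g)
--     bi = _nearest_cube_val(b)
--     cube_idx = 16 + ri * 36 + gi * 6 + bi
--     cr, cg, cb = _CUBE_VALUES[ri], _CUBE_VALUES[gi], _CUBE_VALUES[bi]
--     cube_dist = (r - cr) ** 2 + (g - cg) ** 2 + (b - cb) ** 2
--
--     # Find best grayscale match
--     gray_avg = (r + g + b) // 3
--     gray_step = max(0, min(23, (gray_avg - 8 + 5) // 10))
--     gray_idx = 232 + gray_step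
--     gv = 8 + gray_step * 10
--     gray_dist = (r - gv) ** 2 + (g - gv) ** 2 + (b - gv) ** 2
--
--     return gray_idx if gray_dist < cube_dist else cube_idx
-- ===== SOURCE B (Python) =====
-- def _rgb_to_nearest_xterm(r, g, b):
--     """Find the nearest xterm-256 index for an (r, g, b) color.
--     Closed-form per-channel level decision and a lexicographic min over the
--     two (distance, index) candidates instead of linear scans."""
--
--     def level(v):
--         # Nearest 6-level cube index, decided by the floored midpoints
--         # between consecutive cube values (ties go to the lower level).
--         if v > 235:
--             return 5
--         if v > 195:
--             return 4
--         if v > 155: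
--             return 3
--         if v > 115:
--             return 2
--         if v > 47:
--             return 1
--         return 0
--
--     def d2(x, y, z):
--         return (r - x) ** 2 + (g - y) ** 2 + (b - z) ** 2
--
--     vals = (0, 95, 135, 175, 215, 255)
--     ri, gi, bi = level(r), level(g), level(b)
--     cube = (d2(vals[ri], vals[gi], vals[bi]), 16 + 36 * ri + 6 * gi + bi)
--     step = max(0, min(23, ((r + g + b) // 3 - 3) // 10))
--     v = 8 + 10 * step
--     gray = (d2(v, v, v), 232 + step)
--     # cube index (16..231) is always below gray index (232..255), so the
--     # lexicographic min keeps A's cube-wins-on-tie rule.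
--     return min(cube, gray)[1]
-- ===== Notes on version B (the rewrite author's own statement) =====
-- stated objective: simpler
-- what changed: Replaces the per-channel linear argmin scan (tracking best index and best distance) with a closed-form midpoint if-chain per channel, and replaces the final strict-< branch with a lexicographic min over the two (distance, index) candidate tuples, correct because the cube index (16..231) is always below the gray index (232..255) so ties still pick the cube.
import Mathlib
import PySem

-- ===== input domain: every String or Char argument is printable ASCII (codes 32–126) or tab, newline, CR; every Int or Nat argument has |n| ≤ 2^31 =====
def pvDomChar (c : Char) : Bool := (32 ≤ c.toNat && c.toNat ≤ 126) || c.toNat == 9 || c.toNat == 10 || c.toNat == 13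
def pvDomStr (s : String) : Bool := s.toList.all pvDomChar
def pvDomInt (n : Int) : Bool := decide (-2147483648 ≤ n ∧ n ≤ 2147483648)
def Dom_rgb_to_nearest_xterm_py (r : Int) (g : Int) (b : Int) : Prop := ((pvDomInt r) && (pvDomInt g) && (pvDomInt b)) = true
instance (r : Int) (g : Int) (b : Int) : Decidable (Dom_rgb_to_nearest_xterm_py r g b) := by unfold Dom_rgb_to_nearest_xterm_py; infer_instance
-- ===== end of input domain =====

-- B replaces A's per-channel linear nearest-value scan with a closed-form
-- midpoint if-chain per channel and a lexicographic min over the two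
-- (distance, index) candidates (simpler).


-- ===== PORT A =====
def cubeValues : List Int := [0, 95, 135, 175, 215, 255]

-- _nearest_cube_val: loop over range(1,6) tracking (best_i, best_d).
-- _CUBE_VALUES[i] is ported with pyGetD 0 (i is always in range, so exact).
def nearestCubeVal (v : Int) : Int :=
  (((PySem.List.pyRange 1 6 1).foldl (fun (st : Int × Int) i =>
      let d := |v - PySem.List.pyGetD cubeValues i 0|
      if d < st.2 then (i, d) else st)
    (0, |v - PySem.List.pyGetD cubeValues 0 0|))).1

def rgb_to_nearest_xterm_py (r : Int) (g : Int) (b : Int) : Int :=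
  let ri := nearestCubeVal r
  let gi := nearestCubeVal g
  let bi := nearestCubeVal b
  let cube_idx := 16 + ri * 36 + gi * 6 + bi
  let cr := PySem.List.pyGetD cubeValues ri 0
  let cg := PySem.List.pyGetD cubeValues gi 0
  let cb := PySem.List.pyGetD cubeValues bi 0
  let cube_dist := (r - cr) ^ 2 + (g - cg) ^ 2 + (b - cb) ^ 2
  let gray_avg := PySem.Int.floordiv (r + g + b) 3
  let gray_step := max 0 (min 23 (PySem.Int.floordiv (gray_avg - 8 + 5) 10))
  let gray_idx := 232 + gray_step
  let gv := 8 + gray_step * 10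
  let gray_dist := (r - gv) ^ 2 + (g - gv) ^ 2 + (b - gv) ^ 2
  if gray_dist < cube_dist then gray_idx else cube_idx

-- ===== PORT B =====
-- level(v): nearest cube level via the floored-midpoint if-chain.
def levelB (v : Int) : Int :=
  if v > 235 then 5
  else if v > 195 then 4
  else if v > 155 then 3
  else if v > 115 then 2
  else if v > 47 then 1
  else 0

-- d2(x, y, z) with the channels captured from the closure.
def d2B (r g b x y z : Int) : Int :=
  (r - x) ^ 2 + (g - y) ^ 2 + (b - z) ^ 2

-- vals is a 6-tuple in Source B; vals[i] ported as pyGetD over its elements (i always in range).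
def valsB : List Int := [0, 95, 135, 175, 215, 255]

-- min(cube, gray)[1]: Python tuple min is lexicographic; ported by hand, exact.
def tupleMinSnd (cube gray : Int × Int) : Int :=
  if gray.1 < cube.1 ∨ (gray.1 = cube.1 ∧ gray.2 < cube.2) then gray.2 else cube.2

def rgb_to_nearest_xterm_py_alt (r : Int) (g : Int) (b : Int) : Int :=
  let ri := levelB r
  let gi := levelB g
  let bi := levelB b
  let cube : Int × Int :=
    (d2B r g b (PySem.List.pyGetD valsB ri 0) (PySem.List.pyGetD valsB gi 0)
        (PySem.List.pyGetD valsB bi 0),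
     16 + 36 * ri + 6 * gi + bi)
  let step := max 0 (min 23 (PySem.Int.floordiv (PySem.Int.floordiv (r + g + b) 3 - 3) 10))
  let v := 8 + 10 * step
  let gray : Int × Int := (d2B r g b v v v, 232 + step)
  tupleMinSnd cube gray

-- ===== PRECONDITION & SPEC =====
def Spec_rgb_to_nearest_xterm_py (r : Int) (g : Int) (b : Int) (out : Int) : Prop := out = rgb_to_nearest_xterm_py_alt r g b
instance (r : Int) (g : Int) (b : Int) (out : Int) : Decidable (Spec_rgb_to_nearest_xterm_py r g b out) := by unfold Spec_rgb_to_nearest_xterm_py; infer_instance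

-- ===== CLAIM (what is proved, stated in full; the proofs are below) =====
def Claim_equal_rgb_to_nearest_xterm_py : Prop := ∀ (r : Int) (g : Int) (b : Int), Dom_rgb_to_nearest_xterm_py r g b → Spec_rgb_to_nearest_xterm_py r g b (rgb_to_nearest_xterm_py r g b)

-- ===== LEMMAS AND PROOFS =====
set_option maxHeartbeats 1000000 in
theorem nearestCubeVal_eq_levelB (v : Int) : nearestCubeVal v = levelB v := by
  have h : PySem.List.pyRange 1 6 1 = [1, 2, 3, 4, 5] := by decide
  unfold nearestCubeVal levelB cubeValues
  rw [h]
  simp only [List.foldl]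
  norm_num [PySem.List.pyGetD, PySem.List.pyGet?, PySem.List.pyIdx?]
  simp only [show ([0, 95, 135, 175, 215, 255] : List Int)[Int.toNat 2] = 135 from rfl,
    show ([0, 95, 135, 175, 215, 255] : List Int)[Int.toNat 3] = 175 from rfl,
    show ([0, 95, 135, 175, 215, 255] : List Int)[Int.toNat 4] = 215 from rfl,
    show ([0, 95, 135, 175, 215, 255] : List Int)[Int.toNat 5] = 255 from rfl]
  simp only [Int.abs_eq_natAbs]
  split_ifs <;> omega

theorem levelB_bounds (v : Int) : 0 ≤ levelB v ∧ levelB v ≤ 5 := by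
  unfold levelB; split_ifs <;> omega

theorem pyGetD_vals_eq (i : Int) : PySem.List.pyGetD cubeValues i 0 = PySem.List.pyGetD valsB i 0 := rfl

-- the lexicographic min collapses to A's strict-< choice when ci < gi
theorem tupleMinSnd_eq (gd cd gi ci : Int) (h : ci < gi) :
    (if gd < cd then gi else ci) = tupleMinSnd (cd, ci) (gd, gi) := by
  unfold tupleMinSnd
  simp only
  split_ifs <;> omega

-- ===== VERDICT (by name: the statement is the Claim_ definition above) =====
theorem rgb_to_nearest_xterm_py_spec : Claim_equal_rgb_to_nearest_xterm_py := by
  intro r g b _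
  unfold Spec_rgb_to_nearest_xterm_py rgb_to_nearest_xterm_py rgb_to_nearest_xterm_py_alt d2B
  simp only [nearestCubeVal_eq_levelB, pyGetD_vals_eq]
  have hfd : PySem.Int.floordiv (PySem.Int.floordiv (r + g + b) 3 - 8 + 5) 10
      = PySem.Int.floordiv (PySem.Int.floordiv (r + g + b) 3 - 3) 10 := by
    rw [show PySem.Int.floordiv (r + g + b) 3 - 8 + 5
        = PySem.Int.floordiv (r + g + b) 3 - 3 from by ring]
  rw [hfd]
  have hr := levelB_bounds r
  have hg := levelB_bounds g
  have hb := levelB_bounds b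
  set s := max 0 (min 23 (PySem.Int.floordiv (PySem.Int.floordiv (r + g + b) 3 - 3) 10)) with hs
  have hs0 : 0 ≤ s := le_max_left _ _
  have hlt : 16 + levelB r * 36 + levelB g * 6 + levelB b < 232 + s := by omega
  have := tupleMinSnd_eq ((r - (8 + s * 10)) ^ 2 + (g - (8 + s * 10)) ^ 2 + (b - (8 + s * 10)) ^ 2)
    ((r - PySem.List.pyGetD valsB (levelB r) 0) ^ 2 + (g - PySem.List.pyGetD valsB (levelB g) 0) ^ 2
      + (b - PySem.List.pyGetD valsB (levelB b) 0) ^ 2)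
    (232 + s) (16 + levelB r * 36 + levelB g * 6 + levelB b) hlt
  -- align 10 * s vs s * 10 and 36 * ri vs ri * 36 orderings
  rw [this]
  ring_nf
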